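-- pv_equiv track=rewrite | github.com/Bowenn/leetcode | Python/3891. Minimum Increase to Maximize Special Indices/main.py | minIncrease
-- ===== SOURCE A (Python) =====
-- from typing import List
--
-- def minIncrease(nums: List[int]) -> int:
--     n = len(nums)
--     isOdd = n & 1
--     specialCount = (n - 1) // 2
--
--     if isOdd:
--         res = 0
--         for i in range(specialCount):
--             t = max(nums[i * 2], nums[i * 2 + 2]) + 1
--             if nums[i * 2 + 1] < t:
--                 res += t - nums[i * 2 + 1]
--         return res
--
--     toOperateCounts = [0 for _ in range(n - 2)]
--     for i in range(1, n - 1):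
--         toOperateCounts[i - 1] = max(0, max(nums[i - 1], nums[i + 1]) + 1 - nums[i])
--
--     counts = [0, 0]
--     for i in range((n - 2) // 2):
--         counts[1] = min(counts[1] + toOperateCounts[i * 2 + 1], counts[0] + toOperateCounts[i * 2 + 1])
--         counts[0] += toOperateCounts[i * 2]
--
--     return min(counts[0], counts[1])
-- ===== SOURCE B (Python) =====
-- def minIncrease(nums):
--     n = len(nums)
--     cost = [max(0, max(nums[j - 1], nums[j + 1]) + 1 - nums[j]) for j in range(1, n - 1)]
--     # Lexicographic DP over the cost path: maximize number of chosen (non-adjacent)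
--     # interior positions, then minimize the total cost of chosen positions.
--     best_take = (-1, 0)   # (count, cost) with the last position chosen; impossible at start
--     best_skip = (0, 0)    # (count, cost) with the last position not chosen
--     for c in cost:
--         new_take = (best_skip[0] + 1, best_skip[1] + c)
--         new_skip = _better(best_take, best_skip)
--         best_take, best_skip = new_take, new_skip
--     return _better(best_take, best_skip)[1]
--
-- def _better(p, q):
--     if p[0] > q[0] or (p[0] == q[0] and p[1] <= q[1]):
--         return p
--     return q
-- ===== Notes on version B (the rewrite author's own statement) =====
-- stated objective: alternative
-- what changed: A's separate odd-branch summation and even-branch two-parity switch DP are replaced by one uniform lexicographic (maximize count, then minimize cost) independent-set DP over the interior cost array, which handles both parities and all edge sizes with a single loop.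
import Mathlib
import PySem

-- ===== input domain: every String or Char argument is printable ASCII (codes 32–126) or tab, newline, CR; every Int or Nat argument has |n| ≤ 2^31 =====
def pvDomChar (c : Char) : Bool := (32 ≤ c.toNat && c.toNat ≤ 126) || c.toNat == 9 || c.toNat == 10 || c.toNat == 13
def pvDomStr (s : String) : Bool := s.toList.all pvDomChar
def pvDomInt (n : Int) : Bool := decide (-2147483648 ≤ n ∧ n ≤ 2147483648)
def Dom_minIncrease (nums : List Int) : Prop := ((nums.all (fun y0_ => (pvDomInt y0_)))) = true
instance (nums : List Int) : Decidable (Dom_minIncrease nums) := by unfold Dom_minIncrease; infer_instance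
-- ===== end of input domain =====

-- B replaces A's separate odd-branch summation and even-branch two-parity DP by one
-- unified lexicographic (max-count, min-cost) independent-set DP over the interior
-- cost array; objective: alternative (one uniform algorithm, same cost).

-- ===== PORT A =====
def minIncrease (nums : List Int) : Int :=
  let n : Int := nums.length
  -- n & 1 : for n = len(nums) ≥ 0 this is exactly n % 2 (Python %, divisor positive) — exact here
  let isOdd : Int := PySem.Int.mod n 2
  let specialCount : Int := PySem.Int.floordiv (n - 1) 2
  if isOdd ≠ 0 then
    (PySem.List.pyRange 0 specialCount 1).foldl (fun res i =>
      let t := max (PySem.List.pyGetD nums (i * 2) 0) (PySem.List.pyGetD nums (i * 2 + 2) 0) + 1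
      if PySem.List.pyGetD nums (i * 2 + 1) 0 < t then res + (t - PySem.List.pyGetD nums (i * 2 + 1) 0)
      else res) 0
  else
    let toOperateCounts0 : List Int := (PySem.List.pyRange 0 (n - 2) 1).map (fun _ => 0)
    let toOperateCounts : List Int := (PySem.List.pyRange 1 (n - 1) 1).foldl (fun acc i =>
      PySem.List.pySetD acc (i - 1)
        (max 0 (max (PySem.List.pyGetD nums (i - 1) 0) (PySem.List.pyGetD nums (i + 1) 0) + 1
                  - PySem.List.pyGetD nums i 0))) toOperateCounts0
    -- counts = [0, 0] ported as a pair (counts[0], counts[1]); Python updates counts[1]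
    -- first from the old counts, then counts[0]
    let counts : Int × Int := (PySem.List.pyRange 0 (PySem.Int.floordiv (n - 2) 2) 1).foldl
      (fun (c : Int × Int) i =>
        let c1 := min (c.2 + PySem.List.pyGetD toOperateCounts (i * 2 + 1) 0)
                      (c.1 + PySem.List.pyGetD toOperateCounts (i * 2 + 1) 0)
        let c0 := c.1 + PySem.List.pyGetD toOperateCounts (i * 2) 0
        (c0, c1)) (0, 0)
    min counts.1 counts.2

-- ===== PORT B =====
-- _better(p, q) from Source B
def pvBetter (p q : Int × Int) : Int × Int :=
  if p.1 > q.1 ∨ (p.1 = q.1 ∧ p.2 ≤ q.2) then p else q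

def minIncrease_alt (nums : List Int) : Int :=
  let n : Int := nums.length
  let cost : List Int := (PySem.List.pyRange 1 (n - 1) 1).map (fun j =>
    max 0 (max (PySem.List.pyGetD nums (j - 1) 0) (PySem.List.pyGetD nums (j + 1) 0) + 1
             - PySem.List.pyGetD nums j 0))
  let st := cost.foldl (fun (s : (Int × Int) × (Int × Int)) c =>
    ((s.2.1 + 1, s.2.2 + c), pvBetter s.1 s.2)) ((-1, 0), (0, 0))
  (pvBetter st.1 st.2).2

-- ===== PRECONDITION & SPEC =====
def Spec_minIncrease (nums : List Int) (out : Int) : Prop := out = minIncrease_alt nums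
instance (nums : List Int) (out : Int) : Decidable (Spec_minIncrease nums out) := by unfold Spec_minIncrease; infer_instance

-- ===== CLAIM (what is proved, stated in full; the proofs are below) =====
def Claim_equal_minIncrease : Prop := ∀ (nums : List Int), Dom_minIncrease nums → Spec_minIncrease nums (minIncrease nums)

-- ===== LEMMAS AND PROOFS =====

-- interior cost: cf nums j = cost of making nums position j+1 special
def cf (nums : List Int) (j : Nat) : Int :=
  max 0 (max (nums.getD j 0) (nums.getD (j + 2) 0) + 1 - nums.getD (j + 1) 0)

-- Ek K = sum of cf at even indices 0,2,...,2K-2 ; Dk K = A's even-branch counts[1] after K pairs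
def Ek (nums : List Int) : Nat -> Int
  | 0 => 0
  | k + 1 => Ek nums k + cf nums (2 * k)

def Dk (nums : List Int) : Nat -> Int
  | 0 => 0
  | k + 1 => min (Dk nums k) (Ek nums k) + cf nums (2 * k + 1)

theorem pvBetter_gt (p q : Int × Int) (h : q.1 < p.1) : pvBetter p q = p := by
  unfold pvBetter; rw [if_pos (Or.inl h)]

theorem pvBetter_eq_fst (a x y : Int) : pvBetter (a, x) (a, y) = (a, min x y) := by
  unfold pvBetter
  by_cases h : x ≤ y
  · rw [if_pos (Or.inr ⟨rfl, h⟩)]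
    simp [h]
  · rw [if_neg (by simp; omega)]
    simp [min_def]
    omega

theorem getD_map_range_cf (nums : List Int) (m k : Nat) (hk : k < m) :
    ((List.range m).map (cf nums)).getD k 0 = cf nums k := by
  rw [List.getD_eq_getElem _ _ (by simpa using hk)]
  simp

theorem cost_eq (nums : List Int) (m : Nat) (hm : (nums.length : Int) - 1 = 1 + m) :
    (PySem.List.pyRange 1 ((nums.length : Int) - 1) 1).map (fun j =>
      max 0 (max (PySem.List.pyGetD nums (j - 1) 0) (PySem.List.pyGetD nums (j + 1) 0) + 1
               - PySem.List.pyGetD nums j 0))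
    = (List.range m).map (cf nums) := by
  rw [hm, PySem.List.pyRange_one]
  have h1 : ((1 + (m : Int)) - 1).toNat = m := by omega
  rw [h1, List.map_map]
  apply List.map_congr_left
  intro k hk
  simp only [Function.comp]
  have e1 : (1 : Int) + (k : Int) - 1 = ((k : Nat) : Int) := by ring
  have e2 : (1 : Int) + (k : Int) + 1 = ((k + 2 : Nat) : Int) := by push_cast; ring
  have e3 : (1 : Int) + (k : Int) = ((k + 1 : Nat) : Int) := by push_cast; ring
  rw [e1, e2, e3, PySem.List.pyGetD_natCast, PySem.List.pyGetD_natCast, PySem.List.pyGetD_natCast]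
  rfl

theorem build_eq (nums : List Int) (m : Nat) :
    ∀ j, j ≤ m → (PySem.List.pyRange 1 (1 + (j : Int)) 1).foldl (fun acc i =>
      PySem.List.pySetD acc (i - 1)
        (max 0 (max (PySem.List.pyGetD nums (i - 1) 0) (PySem.List.pyGetD nums (i + 1) 0) + 1
                  - PySem.List.pyGetD nums i 0))) ((List.range m).map (fun _ => 0))
    = (List.range m).map (fun k => if k < j then cf nums k else 0) := by
  intro j
  induction j with
  | zero =>
    intro _
    rw [show (1 + ((0 : Nat) : Int)) = 1 by norm_num, PySem.List.pyRange_one_eq_nil le_rfl]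
    simp
  | succ j ih =>
    intro hj
    have e0 : (1 : Int) + ((j + 1 : Nat) : Int) = (1 + (j : Int)) + 1 := by push_cast; ring
    rw [e0, PySem.List.pyRange_one_succ_right (by omega), List.foldl_append, ih (by omega)]
    simp only [List.foldl_cons, List.foldl_nil]
    have e1 : (1 : Int) + (j : Int) - 1 = ((j : Nat) : Int) := by ring
    have e2 : (1 : Int) + (j : Int) + 1 = ((j + 2 : Nat) : Int) := by push_cast; ring
    have e3 : (1 : Int) + (j : Int) = ((j + 1 : Nat) : Int) := by push_cast; ring
    rw [e1, PySem.List.pySetD_natCast]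
    apply List.ext_getElem
    · simp
    · intro k hk hk'
      simp only [List.length_set, List.length_map, List.length_range] at hk hk'
      rw [List.getElem_set]
      simp only [List.getElem_map, List.getElem_range]
      by_cases hkj : j = k
      · subst hkj
        rw [if_pos rfl, if_pos (by omega), e2, e3]
        simp only [PySem.List.pyGetD_natCast]
        rfl
      · rw [if_neg hkj]
        have hkk : k < j ↔ k < j + 1 := by omega
        simp only [hkk]

theorem evenDP_eq (nums : List Int) (m : Nat) :
    ∀ K, 2 * K ≤ m → (PySem.List.pyRange 0 ((K : Nat) : Int) 1).foldl (fun (c : Int × Int) i =>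
      let c1 := min (c.2 + PySem.List.pyGetD ((List.range m).map (cf nums)) (i * 2 + 1) 0)
                    (c.1 + PySem.List.pyGetD ((List.range m).map (cf nums)) (i * 2 + 1) 0)
      let c0 := c.1 + PySem.List.pyGetD ((List.range m).map (cf nums)) (i * 2) 0
      (c0, c1)) (0, 0) = (Ek nums K, Dk nums K) := by
  intro K
  induction K with
  | zero =>
    intro _
    rw [show (((0 : Nat) : Int)) = 0 by norm_num, PySem.List.pyRange_one_eq_nil le_rfl]
    rfl
  | succ K ih =>
    intro hK
    have e0 : (((K + 1 : Nat)) : Int) = ((K : Nat) : Int) + 1 := by push_cast; ring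
    rw [e0, PySem.List.pyRange_one_succ_right (by positivity), List.foldl_append, ih (by omega)]
    dsimp only [List.foldl_cons, List.foldl_nil]
    have e1 : ((K : Nat) : Int) * 2 = ((2 * K : Nat) : Int) := by push_cast; ring
    have h1 : ((2 * K : Nat) : Int) + 1 = ((2 * K + 1 : Nat) : Int) := by push_cast; ring
    simp only [e1, h1, PySem.List.pyGetD_natCast]
    rw [getD_map_range_cf nums m (2 * K) (by omega), getD_map_range_cf nums m (2 * K + 1) (by omega)]
    rw [Prod.mk.injEq]
    refine ⟨rfl, ?_⟩
    rw [show Dk nums (K + 1) = min (Dk nums K) (Ek nums K) + cf nums (2 * K + 1) from rfl]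
    omega

theorem oddRes_eq (nums : List Int) :
    ∀ K : Nat, (PySem.List.pyRange 0 ((K : Nat) : Int) 1).foldl (fun res i =>
      let t := max (PySem.List.pyGetD nums (i * 2) 0) (PySem.List.pyGetD nums (i * 2 + 2) 0) + 1
      if PySem.List.pyGetD nums (i * 2 + 1) 0 < t then res + (t - PySem.List.pyGetD nums (i * 2 + 1) 0)
      else res) 0 = Ek nums K := by
  intro K
  induction K with
  | zero =>
    rw [show (((0 : Nat) : Int)) = 0 by norm_num, PySem.List.pyRange_one_eq_nil le_rfl]
    rfl
  | succ K ih =>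
    have e0 : (((K + 1 : Nat)) : Int) = ((K : Nat) : Int) + 1 := by push_cast; ring
    rw [e0, PySem.List.pyRange_one_succ_right (by positivity), List.foldl_append, ih]
    dsimp only [List.foldl_cons, List.foldl_nil]
    have e1 : ((K : Nat) : Int) * 2 = ((2 * K : Nat) : Int) := by push_cast; ring
    have h1 : ((2 * K : Nat) : Int) + 1 = ((2 * K + 1 : Nat) : Int) := by push_cast; ring
    have h2 : ((2 * K : Nat) : Int) + 2 = ((2 * K + 2 : Nat) : Int) := by push_cast; ring
    simp only [e1, h1, h2, PySem.List.pyGetD_natCast]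
    rw [show Ek nums (K + 1) = Ek nums K + cf nums (2 * K) from rfl]
    unfold cf
    rw [Int.max_def, Int.max_def]
    split_ifs <;> omega

theorem altDP_eq (nums : List Int) :
    ∀ K : Nat, 1 ≤ K →
    ((List.range (2 * K)).map (cf nums)).foldl
      (fun (s : (Int × Int) × (Int × Int)) c => ((s.2.1 + 1, s.2.2 + c), pvBetter s.1 s.2))
      ((-1, 0), (0, 0))
    = ((((K : Nat) : Int), Dk nums K), (((K : Nat) : Int), Ek nums K)) := by
  intro K
  induction K with
  | zero => intro h; omega
  | succ K ih =>
    intro _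
    by_cases hK : K = 0
    · subst hK
      show ((List.range 2).map (cf nums)).foldl _ _ = _
      rw [show List.range 2 = [0, 1] by rfl]
      dsimp only [List.map_cons, List.map_nil, List.foldl_cons, List.foldl_nil]
      rw [show pvBetter ((-1 : Int), (0 : Int)) (0, 0) = (0, 0) by decide]
      rw [pvBetter_gt _ _ (by norm_num)]
      simp [Ek, Dk]
    · have hK1 : 1 ≤ K := by omega
      have e0 : 2 * (K + 1) = (2 * K + 1) + 1 := by ring
      rw [e0, List.range_succ, List.range_succ, List.map_append, List.map_append,
          List.foldl_append, List.foldl_append, ih hK1]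
      dsimp only [List.map_cons, List.map_nil, List.foldl_cons, List.foldl_nil]
      rw [pvBetter_eq_fst]
      rw [pvBetter_gt _ _ (by dsimp only; omega)]
      have e1 : (((K + 1 : Nat)) : Int) = ((K : Nat) : Int) + 1 := by push_cast; ring
      rw [e1]
      rw [show Ek nums (K + 1) = Ek nums K + cf nums (2 * K) from rfl,
          show Dk nums (K + 1) = min (Dk nums K) (Ek nums K) + cf nums (2 * K + 1) from rfl]

theorem mod_two_natCast (n : Nat) : PySem.Int.mod ((n : Nat) : Int) 2 = ((n % 2 : Nat) : Int) := by
  exact_mod_cast PySem.Int.mod_natCast n 2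

theorem floordiv_two_natCast (n : Nat) : PySem.Int.floordiv ((n : Nat) : Int) 2 = ((n / 2 : Nat) : Int) := by
  exact_mod_cast PySem.Int.floordiv_natCast n 2

theorem A_odd (nums : List Int) (K : Nat) (h : PySem.Int.mod ((nums.length : Nat) : Int) 2 ≠ 0)
    (hK : PySem.Int.floordiv (((nums.length : Nat) : Int) - 1) 2 = ((K : Nat) : Int)) :
    minIncrease nums = Ek nums K := by
  unfold minIncrease
  dsimp only
  rw [if_pos h, hK, oddRes_eq]

theorem A_even (nums : List Int) (h : ¬ (PySem.Int.mod ((nums.length : Nat) : Int) 2 ≠ 0))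
    (hn2 : 2 ≤ nums.length) :
    minIncrease nums = min (Ek nums ((nums.length - 2) / 2)) (Dk nums ((nums.length - 2) / 2)) := by
  unfold minIncrease
  dsimp only
  rw [if_neg h]
  have e2 : ((nums.length : Nat) : Int) - 2 = (((nums.length - 2 : Nat)) : Int) := by omega
  have e1 : ((nums.length : Nat) : Int) - 1 = 1 + (((nums.length - 2 : Nat)) : Int) := by omega
  -- the initial all-zero list is (range m).map (fun _ => 0)
  have hinit : (PySem.List.pyRange 0 (((nums.length : Nat) : Int) - 2) 1).map (fun _ => (0 : Int))
      = (List.range (nums.length - 2)).map (fun _ => (0 : Int)) := by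
    rw [e2, List.map_const', List.map_const', PySem.List.length_pyRange_one, List.length_range]
    have e3 : ((((nums.length - 2 : Nat)) : Int) - 0).toNat = nums.length - 2 := by omega
    rw [e3]
  rw [hinit, e1, build_eq nums (nums.length - 2) (nums.length - 2) le_rfl]
  have hmap : (List.range (nums.length - 2)).map (fun k => if k < nums.length - 2 then cf nums k else 0)
      = (List.range (nums.length - 2)).map (cf nums) := by
    exact List.map_congr_left (fun k hk => if_pos (List.mem_range.mp hk))
  rw [hmap]
  rw [e2]
  rw [floordiv_two_natCast]
  rw [evenDP_eq nums (nums.length - 2) ((nums.length - 2) / 2) (by omega)]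

theorem alt_nil (nums : List Int) (h : ((nums.length : Nat) : Int) - 1 ≤ 1) :
    minIncrease_alt nums = 0 := by
  unfold minIncrease_alt
  dsimp only
  rw [PySem.List.pyRange_one_eq_nil h]
  rfl

theorem alt_cost (nums : List Int) (m : Nat) (hm : ((nums.length : Nat) : Int) - 1 = 1 + (m : Int)) :
    minIncrease_alt nums = (pvBetter
      (((List.range m).map (cf nums)).foldl
        (fun (s : (Int × Int) × (Int × Int)) c => ((s.2.1 + 1, s.2.2 + c), pvBetter s.1 s.2))
        ((-1, 0), (0, 0))).1
      (((List.range m).map (cf nums)).foldl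
        (fun (s : (Int × Int) × (Int × Int)) c => ((s.2.1 + 1, s.2.2 + c), pvBetter s.1 s.2))
        ((-1, 0), (0, 0))).2).2 := by
  unfold minIncrease_alt
  dsimp only
  rw [cost_eq nums m hm]

theorem alt_even (nums : List Int) (K : Nat) (hK : 1 ≤ K)
    (hm : ((nums.length : Nat) : Int) - 1 = 1 + ((2 * K : Nat) : Int)) :
    minIncrease_alt nums = min (Ek nums K) (Dk nums K) := by
  rw [alt_cost nums (2 * K) hm, altDP_eq nums K hK]
  rw [pvBetter_eq_fst]
  exact min_comm _ _

theorem alt_odd (nums : List Int) (K' : Nat)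
    (hm : ((nums.length : Nat) : Int) - 1 = 1 + ((2 * K' + 1 : Nat) : Int)) :
    minIncrease_alt nums = Ek nums (K' + 1) := by
  rw [alt_cost nums (2 * K' + 1) hm, List.range_succ, List.map_append, List.foldl_append]
  by_cases hK : K' = 0
  · subst hK
    simp only [Nat.mul_zero, List.range_zero, List.map_nil, List.foldl_nil, List.map_cons,
      List.foldl_cons]
    rw [show pvBetter ((-1 : Int), (0 : Int)) (0, 0) = (0, 0) by decide]
    rw [pvBetter_gt _ _ (by norm_num)]
    simp [Ek]
  · rw [altDP_eq nums K' (by omega)]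
    dsimp only [List.map_cons, List.map_nil, List.foldl_cons, List.foldl_nil]
    rw [pvBetter_eq_fst]
    rw [pvBetter_gt _ _ (by dsimp only; omega)]
    rfl

-- ===== VERDICT (by name: the statement is the Claim_ definition above) =====
theorem minIncrease_spec : Claim_equal_minIncrease := by
  intro nums _
  unfold Spec_minIncrease
  rcases Nat.eq_zero_or_pos nums.length with h0 | hpos
  · have hnil : nums = [] := List.eq_nil_of_length_eq_zero h0
    subst hnil
    decide
  rcases Nat.mod_two_eq_zero_or_one nums.length with he | ho
  · -- even length, ≥ 2
    have hn2 : 2 ≤ nums.length := by omega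
    have hmodz : ¬ (PySem.Int.mod ((nums.length : Nat) : Int) 2 ≠ 0) := by
      rw [mod_two_natCast, he]
      norm_num
    rw [A_even nums hmodz hn2]
    by_cases hK : (nums.length - 2) / 2 = 0
    · have : nums.length = 2 := by omega
      rw [alt_nil nums (by omega), hK]
      simp [Ek, Dk]
    · rw [alt_even nums ((nums.length - 2) / 2) (by omega) (by push_cast; omega)]
  · -- odd length
    have hmodo : PySem.Int.mod ((nums.length : Nat) : Int) 2 ≠ 0 := by
      rw [mod_two_natCast, ho]
      norm_num
    have hK : PySem.Int.floordiv (((nums.length : Nat) : Int) - 1) 2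
        = (((nums.length - 1) / 2 : Nat) : Int) := by
      rw [show ((nums.length : Nat) : Int) - 1 = (((nums.length - 1 : Nat)) : Int) by omega,
          floordiv_two_natCast]
    rw [A_odd nums ((nums.length - 1) / 2) hmodo hK]
    by_cases h1 : nums.length = 1
    · rw [alt_nil nums (by omega), h1]
      rfl
    · have h3 : 3 ≤ nums.length := by omega
      rw [alt_odd nums ((nums.length - 1) / 2 - 1) (by push_cast; omega)]
      congr 1
      omega
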